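-- pv_equiv track=rewrite | github.com/Koyojin/practice | 213.py | mergeAndSortTwoListReverse
-- ===== SOURCE A (Python) =====
-- def mergeAndSortTwoListReverse(lst1,lst2):
--     tlst= lst1+lst2
--     ftlst=[]
--     for i in tlst:
--         if i not in ftlst:
--             ftlst.append(i)
--     ftlst.sort()
--     ftlst.reverse()
--     return ftlst
-- ===== SOURCE B (Python) =====
-- def mergeAndSortTwoListReverse(lst1, lst2):
--     merged = sorted(lst1 + lst2, reverse=True)
--     result = []
--     for x in merged:
--         if not result or result[-1] != x:
--             result.append(x)
--     return result
-- ===== Notes on version B (the rewrite author's own statement) =====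
-- stated objective: faster
-- what changed: B sorts the concatenation descending first and removes duplicates in one adjacent-comparison pass, instead of A's O(n^2) membership-test dedup followed by sort+reverse.
import Mathlib
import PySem

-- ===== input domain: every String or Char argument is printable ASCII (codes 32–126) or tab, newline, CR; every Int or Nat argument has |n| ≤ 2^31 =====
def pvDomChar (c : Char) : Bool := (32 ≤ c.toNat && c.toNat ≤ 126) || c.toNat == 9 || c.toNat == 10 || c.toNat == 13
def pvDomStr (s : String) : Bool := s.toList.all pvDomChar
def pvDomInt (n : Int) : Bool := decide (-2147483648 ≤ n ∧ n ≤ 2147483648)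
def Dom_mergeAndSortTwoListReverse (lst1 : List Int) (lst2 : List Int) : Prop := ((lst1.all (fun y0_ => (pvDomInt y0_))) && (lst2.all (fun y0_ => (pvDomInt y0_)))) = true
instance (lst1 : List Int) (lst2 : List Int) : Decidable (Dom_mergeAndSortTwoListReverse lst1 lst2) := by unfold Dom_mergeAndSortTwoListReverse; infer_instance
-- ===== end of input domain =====

-- B sorts the concatenation descending first and dedupes in one adjacent-comparison pass,
-- replacing A's quadratic membership-test dedup followed by sort+reverse.

-- ===== PORT A =====
def mergeAndSortTwoListReverse (lst1 : List Int) (lst2 : List Int) : List Int :=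
  let tlst := lst1 ++ lst2
  let ftlst := tlst.foldl (fun acc i => if !(acc.contains i) then acc ++ [i] else acc) []
  ((PySem.List.sorted ftlst (fun x => x) false).reverse)

-- ===== PORT B =====
def mergeAndSortTwoListReverse_alt (lst1 : List Int) (lst2 : List Int) : List Int :=
  let merged := PySem.List.sorted (lst1 ++ lst2) (fun x => x) true
  merged.foldl (fun res x => if res.isEmpty || !(res.getLast? == some x) then res ++ [x] else res) []

-- ===== PRECONDITION & SPEC =====
def Spec_mergeAndSortTwoListReverse (lst1 : List Int) (lst2 : List Int) (out : List Int) : Prop := out = mergeAndSortTwoListReverse_alt lst1 lst2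
instance (lst1 : List Int) (lst2 : List Int) (out : List Int) : Decidable (Spec_mergeAndSortTwoListReverse lst1 lst2 out) := by unfold Spec_mergeAndSortTwoListReverse; infer_instance

-- ===== CLAIM (what is proved, stated in full; the proofs are below) =====
def Claim_equal_mergeAndSortTwoListReverse : Prop := ∀ (lst1 : List Int) (lst2 : List Int), Dom_mergeAndSortTwoListReverse lst1 lst2 → Spec_mergeAndSortTwoListReverse lst1 lst2 (mergeAndSortTwoListReverse lst1 lst2)

-- ===== LEMMAS AND PROOFS =====

-- Adjacent-dedup continuation: the suffix produced after the last kept element is `a`.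
def dedupAdjFrom (a : Int) : List Int → List Int
  | [] => []
  | x :: l => if x = a then dedupAdjFrom a l else x :: dedupAdjFrom x l

lemma dedupAdjFrom_cons_eq (a : Int) (l : List Int) :
    dedupAdjFrom a (a :: l) = dedupAdjFrom a l := by simp [dedupAdjFrom]

lemma dedupAdjFrom_cons_ne (a y : Int) (l : List Int) (hy : y ≠ a) :
    dedupAdjFrom a (y :: l) = y :: dedupAdjFrom y l := by simp [dedupAdjFrom, hy]

-- B's fold, once one element has been kept, computes dedupAdjFrom.
lemma foldB_concat (l : List Int) : ∀ (a : Int) (acc : List Int),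
    l.foldl (fun res x => if res.isEmpty || !(res.getLast? == some x) then res ++ [x] else res) (acc ++ [a])
      = acc ++ [a] ++ dedupAdjFrom a l := by
  induction l with
  | nil => intro a acc; simp [dedupAdjFrom]
  | cons x l ih =>
    intro a acc
    rw [List.foldl_cons]
    by_cases hx : x = a
    · subst hx
      have hc : ((acc ++ [x]).isEmpty || !((acc ++ [x]).getLast? == some x)) = false := by
        simp
      rw [hc, dedupAdjFrom_cons_eq]
      simpa using ih x acc
    · have hc : ((acc ++ [a]).isEmpty || !((acc ++ [a]).getLast? == some x)) = true := by
        simp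
        omega
      rw [hc, dedupAdjFrom_cons_ne a x l hx]
      have := ih x (acc ++ [a])
      simpa [List.append_assoc] using this

lemma foldB_eq (l : List Int) :
    l.foldl (fun res x => if res.isEmpty || !(res.getLast? == some x) then res ++ [x] else res) []
      = match l with | [] => [] | m :: rest => m :: dedupAdjFrom m rest := by
  cases l with
  | nil => rfl
  | cons m rest =>
    have := foldB_concat rest m []
    simpa using this

lemma mem_dedupAdjFrom (x : Int) : ∀ (l : List Int) (a : Int),
    x ∈ a :: dedupAdjFrom a l ↔ x ∈ a :: l := by
  intro l
  induction l with
  | nil => intro a; simp [dedupAdjFrom]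
  | cons y l ih =>
    intro a
    by_cases hy : y = a
    · subst hy
      rw [dedupAdjFrom_cons_eq, ih y]
      simp
    · rw [dedupAdjFrom_cons_ne a y l hy]
      constructor
      · intro h
        rcases List.mem_cons.mp h with h | h
        · simp [h]
        · have := (ih y).mp h
          simp only [List.mem_cons] at this ⊢
          tauto
      · intro h
        simp only [List.mem_cons] at h
        rcases h with h | h
        · simp [h]
        · have : x ∈ y :: dedupAdjFrom y l := (ih y).mpr (List.mem_cons.mpr h)
          simp only [List.mem_cons] at this ⊢
          tauto

lemma pairwise_dedupAdjFrom : ∀ (l : List Int) (a : Int),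
    (a :: l).Pairwise (fun p q => q ≤ p) →
    (a :: dedupAdjFrom a l).Pairwise (fun p q => p > q) := by
  intro l
  induction l with
  | nil => intro a _; simp [dedupAdjFrom]
  | cons y l ih =>
    intro a h
    rw [List.pairwise_cons] at h
    obtain ⟨hle, hyl⟩ := h
    rw [List.pairwise_cons] at hyl
    obtain ⟨hyle, hl⟩ := hyl
    by_cases hy : y = a
    · subst hy
      rw [dedupAdjFrom_cons_eq]
      exact ih y (List.pairwise_cons.mpr ⟨hyle, hl⟩)
    · rw [dedupAdjFrom_cons_ne a y l hy]
      have hlt : y < a := lt_of_le_of_ne (hle y (by simp)) hy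
      have htail : (y :: dedupAdjFrom y l).Pairwise (fun p q => p > q) :=
        ih y (List.pairwise_cons.mpr ⟨hyle, hl⟩)
      refine List.pairwise_cons.mpr ⟨?_, htail⟩
      intro z hz
      have hz' : z ∈ y :: l := (mem_dedupAdjFrom z l y).mp hz
      rcases List.mem_cons.mp hz' with h | h
      · simpa [h] using hlt
      · exact lt_of_le_of_lt (hyle z h) hlt

-- A's dedup fold: membership and nodup.
lemma mem_foldA (x : Int) : ∀ (l acc : List Int),
    x ∈ l.foldl (fun acc i => if !(acc.contains i) then acc ++ [i] else acc) acc ↔ x ∈ acc ∨ x ∈ l := by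
  intro l
  induction l with
  | nil => intro acc; simp
  | cons y l ih =>
    intro acc
    rw [List.foldl_cons]
    by_cases hy : acc.contains y
    · have hmem : y ∈ acc := List.contains_iff_mem.mp hy
      have hstep : (if !(acc.contains y) then acc ++ [y] else acc) = acc := by simp [hmem]
      rw [hstep, ih]
      simp only [List.mem_cons]
      constructor
      · tauto
      · rintro (h | h | h)
        · tauto
        · subst h; tauto
        · tauto
    · have hnm : y ∉ acc := fun hm => hy (List.contains_iff_mem.mpr hm)
      have hstep : (if !(acc.contains y) then acc ++ [y] else acc) = acc ++ [y] := by simp [hnm]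
      rw [hstep, ih]
      simp [List.mem_append, List.mem_cons, or_assoc]

lemma nodup_foldA : ∀ (l acc : List Int), acc.Nodup →
    (l.foldl (fun acc i => if !(acc.contains i) then acc ++ [i] else acc) acc).Nodup := by
  intro l
  induction l with
  | nil => intro acc h; simpa
  | cons y l ih =>
    intro acc h
    rw [List.foldl_cons]
    by_cases hy : acc.contains y
    · have hmem : y ∈ acc := List.contains_iff_mem.mp hy
      have hstep : (if !(acc.contains y) then acc ++ [y] else acc) = acc := by simp [hmem]
      rw [hstep]
      exact ih acc h
    · have hny : y ∉ acc := fun hm => hy (List.contains_iff_mem.mpr hm)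
      have hstep : (if !(acc.contains y) then acc ++ [y] else acc) = acc ++ [y] := by simp [hny]
      rw [hstep]
      exact ih (acc ++ [y]) (by simp [List.nodup_append, h]; exact fun a ha he => hny (he ▸ ha))

-- Two strictly descending lists with the same members are equal.
lemma eq_of_sorted_gt : ∀ (l1 l2 : List Int),
    l1.Pairwise (fun p q => p > q) → l2.Pairwise (fun p q => p > q) →
    (∀ x, x ∈ l1 ↔ x ∈ l2) → l1 = l2 := by
  intro l1
  induction l1 with
  | nil =>
    intro l2 _ _ hmem
    cases l2 with
    | nil => rfl
    | cons b t => exact absurd ((hmem b).mpr (by simp)) (by simp)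
  | cons a t1 ih =>
    intro l2 h1 h2 hmem
    cases l2 with
    | nil => exact absurd ((hmem a).mp (by simp)) (by simp)
    | cons b t2 =>
      rw [List.pairwise_cons] at h1 h2
      obtain ⟨ha, ht1⟩ := h1
      obtain ⟨hb, ht2⟩ := h2
      have hab : a = b := by
        have h1' := (hmem a).mp (by simp)
        have h2' := (hmem b).mpr (by simp)
        rcases List.mem_cons.mp h1' with h | h
        · exact h
        · rcases List.mem_cons.mp h2' with h' | h'
          · exact h'.symm
          · have := hb a h; have := ha b h'; omega
      subst hab
      have htmem : ∀ x, x ∈ t1 ↔ x ∈ t2 := by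
        intro x
        constructor
        · intro hx
          have hxa : x < a := ha x hx
          rcases List.mem_cons.mp ((hmem x).mp (by simp [hx])) with h | h
          · omega
          · exact h
        · intro hx
          have hxa : x < a := hb x hx
          rcases List.mem_cons.mp ((hmem x).mpr (by simp [hx])) with h | h
          · omega
          · exact h
      rw [ih t2 ht1 ht2 htmem]

-- ===== VERDICT (by name: the statement is the Claim_ definition above) =====
theorem mergeAndSortTwoListReverse_spec : Claim_equal_mergeAndSortTwoListReverse := by
  intro lst1 lst2 _
  unfold Spec_mergeAndSortTwoListReverse mergeAndSortTwoListReverse mergeAndSortTwoListReverse_alt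
  set tlst := lst1 ++ lst2 with htlst
  set ftlst := tlst.foldl (fun acc i => if !(acc.contains i) then acc ++ [i] else acc) [] with hft
  set s := PySem.List.sorted ftlst (fun x => x) false with hs
  set merged := PySem.List.sorted tlst (fun x => x) true with hm
  -- A's result
  have hsperm : s.Perm ftlst := PySem.List.sorted_perm ftlst (fun x => x) false
  have hsnodup : s.Nodup := hsperm.nodup_iff.mpr (nodup_foldA tlst [] (by simp))
  have hsle : s.Pairwise (fun a b => a ≤ b) := by
    simpa using PySem.List.sorted_pairwise (xs := ftlst) (key := fun x => x)
  have hslt : s.Pairwise (fun a b => a < b) := by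
    have := List.Pairwise.and hsle hsnodup
    exact this.imp (fun {a b} h => lt_of_le_of_ne h.1 h.2)
  have hArev : s.reverse.Pairwise (fun p q => p > q) := by
    rw [List.pairwise_reverse]; exact hslt
  have hAmem : ∀ x, x ∈ s.reverse ↔ x ∈ tlst := by
    intro x
    rw [List.mem_reverse, hsperm.mem_iff, hft, mem_foldA x tlst []]
    simp
  -- B's result
  have hmperm : merged.Perm tlst := PySem.List.sorted_perm tlst (fun x => x) true
  have hmge : merged.Pairwise (fun a b => b ≤ a) := by
    simpa using PySem.List.sorted_pairwise_rev (xs := tlst) (key := fun x => x)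
  rw [foldB_eq]
  cases hmc : merged with
  | nil =>
    have htnil : tlst = [] := by
      have hp := hmperm
      rw [hmc] at hp
      exact List.nil_perm.mp hp
    apply eq_of_sorted_gt _ _ hArev (by simp)
    intro x
    rw [hAmem x, htnil]
  | cons m rest =>
    apply eq_of_sorted_gt _ _ hArev
    · exact pairwise_dedupAdjFrom rest m (hmc ▸ hmge)
    · intro x
      rw [hAmem x, mem_dedupAdjFrom, ← hmc, hmperm.mem_iff]
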